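-- pv_equiv track=rewrite | github.com/kanwalzs/Guide-Generator | utils/fail-fast-constraint-detector.py | get_alternative_suggestions
-- ===== SOURCE A (Python) =====
-- def get_alternative_suggestions(violations):
--     """Suggest alternative features based on violation types"""
--
--     alternatives = []
--
--     # Map violation types to alternatives
--     violation_features = [v['feature'] for v in violations]
--
--     if any('Replication' in f or 'Disaster' in f or 'Failover' in f for f in violation_features):
--         alternatives.extend([
--             "Table cloning for data backup and recovery",
--             "Time travel for historical data access",
--             "Zero-copy cloning for data protection",
--             "Incremental data loading patterns"
--         ])
--
--     if any('Sharing' in f for f in violation_features):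
--         alternatives.extend([
--             "Secure views for data access control",
--             "Row-level security within schemas",
--             "Dynamic data masking techniques",
--             "Role-based access patterns"
--         ])
--
--     if any('Integration' in f or 'External' in f for f in violation_features):
--         alternatives.extend([
--             "Internal data transformation pipelines",
--             "Semi-structured data processing (JSON/XML)",
--             "File format handling and parsing",
--             "Data quality validation techniques"
--         ])
--
--     if any('Management' in f or 'Account' in f for f in violation_features):
--         alternatives.extend([
--             "Query optimization and performance tuning",
--             "Advanced SQL techniques and patterns",
--             "Data modeling best practices",
--             "Monitoring and observability within schemas"
--         ])
--
--     # Remove duplicates while preserving order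
--     seen = set()
--     unique_alternatives = []
--     for alt in alternatives:
--         if alt not in seen:
--             seen.add(alt)
--             unique_alternatives.append(alt)
--
--     return unique_alternatives
-- ===== SOURCE B (Python) =====
-- def get_alternative_suggestions(violations):
--     """Suggest alternative features based on violation types.
--
--     Single pass over the violations accumulating one flag per category;
--     no dedup pass is needed because the four suggestion lists are pairwise
--     disjoint, so the concatenation never contains duplicates.
--     """
--     repl = shar = integ = mgmt = False
--     for v in violations:
--         f = v['feature']
--         repl = repl or 'Replication' in f or 'Disaster' in f or 'Failover' in f
--         shar = shar or 'Sharing' in f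
--         integ = integ or 'Integration' in f or 'External' in f
--         mgmt = mgmt or 'Management' in f or 'Account' in f
--
--     out = []
--     if repl:
--         out += [
--             "Table cloning for data backup and recovery",
--             "Time travel for historical data access",
--             "Zero-copy cloning for data protection",
--             "Incremental data loading patterns",
--         ]
--     if shar:
--         out += [
--             "Secure views for data access control",
--             "Row-level security within schemas",
--             "Dynamic data masking techniques",
--             "Role-based access patterns",
--         ]
--     if integ:
--         out += [
--             "Internal data transformation pipelines",
--             "Semi-structured data processing (JSON/XML)",
--             "File format handling and parsing",
--             "Data quality validation techniques",
--         ]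
--     if mgmt:
--         out += [
--             "Query optimization and performance tuning",
--             "Advanced SQL techniques and patterns",
--             "Data modeling best practices",
--             "Monitoring and observability within schemas",
--         ]
--     return out
-- ===== Notes on version B (the rewrite author's own statement) =====
-- stated objective: simpler
-- what changed: Replaces A's intermediate feature list plus four separate any-scans plus a seen-set dedup loop by a single pass over violations accumulating four category flags, and drops the dedup entirely since the four suggestion lists are pairwise disjoint (so A's dedup is provably a no-op).
import Mathlib
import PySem

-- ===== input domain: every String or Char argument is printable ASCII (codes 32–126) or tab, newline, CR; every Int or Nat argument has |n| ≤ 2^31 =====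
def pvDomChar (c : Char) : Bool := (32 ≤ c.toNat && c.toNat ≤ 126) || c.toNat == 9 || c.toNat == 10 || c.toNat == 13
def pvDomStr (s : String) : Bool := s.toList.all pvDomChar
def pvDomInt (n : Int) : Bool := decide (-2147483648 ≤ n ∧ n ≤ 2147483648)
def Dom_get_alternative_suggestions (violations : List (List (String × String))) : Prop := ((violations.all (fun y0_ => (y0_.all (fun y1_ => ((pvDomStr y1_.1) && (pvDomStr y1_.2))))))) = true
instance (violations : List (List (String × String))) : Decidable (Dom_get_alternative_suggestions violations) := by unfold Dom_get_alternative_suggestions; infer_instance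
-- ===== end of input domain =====

-- B makes one pass over the violations accumulating four category flags (A builds a feature
-- list and scans it four times), and drops A's dedup loop: the suggestion lists are disjoint.

-- ===== PORT A =====
-- the final 'seen'/'unique_alternatives' dedup loop of A
def pvDedupLoopA : List String → PySem.Set String → List String → List String
  | [], _, uniq => uniq
  | a :: rest, seen, uniq =>
    if PySem.Set.contains seen a then pvDedupLoopA rest seen uniq
    else pvDedupLoopA rest (PySem.Set.add seen a) (uniq ++ [a])

def get_alternative_suggestions (violations : List (List (String × String))) : List String :=
  let violation_features := violations.map (fun v => PySem.Dict.getD (PySem.Dict.mk v) "feature" "")  -- total under Pre_ (key present)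
  let alternatives : List String :=
    (if violation_features.any (fun f =>
        PySem.Str.isIn "Replication" f || PySem.Str.isIn "Disaster" f || PySem.Str.isIn "Failover" f) then
      ["Table cloning for data backup and recovery",
       "Time travel for historical data access",
       "Zero-copy cloning for data protection",
       "Incremental data loading patterns"] else []) ++
    (if violation_features.any (fun f => PySem.Str.isIn "Sharing" f) then
      ["Secure views for data access control",
       "Row-level security within schemas",
       "Dynamic data masking techniques",
       "Role-based access patterns"] else []) ++
    (if violation_features.any (fun f =>
        PySem.Str.isIn "Integration" f || PySem.Str.isIn "External" f) then
      ["Internal data transformation pipelines",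
       "Semi-structured data processing (JSON/XML)",
       "File format handling and parsing",
       "Data quality validation techniques"] else []) ++
    (if violation_features.any (fun f =>
        PySem.Str.isIn "Management" f || PySem.Str.isIn "Account" f) then
      ["Query optimization and performance tuning",
       "Advanced SQL techniques and patterns",
       "Data modeling best practices",
       "Monitoring and observability within schemas"] else [])
  pvDedupLoopA alternatives [] []

-- ===== PORT B =====
-- one pass: fold over the violations, OR-ing the per-category keyword tests into four flags
def get_alternative_suggestions_alt (violations : List (List (String × String))) : List String :=
  let st := violations.foldl (fun (acc : Bool × Bool × Bool × Bool) v =>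
      let f := PySem.Dict.getD (PySem.Dict.mk v) "feature" ""
      (acc.1 || PySem.Str.isIn "Replication" f || PySem.Str.isIn "Disaster" f || PySem.Str.isIn "Failover" f,
       acc.2.1 || PySem.Str.isIn "Sharing" f,
       acc.2.2.1 || PySem.Str.isIn "Integration" f || PySem.Str.isIn "External" f,
       acc.2.2.2 || PySem.Str.isIn "Management" f || PySem.Str.isIn "Account" f))
    (false, false, false, false)
  (if st.1 then
      ["Table cloning for data backup and recovery",
       "Time travel for historical data access",
       "Zero-copy cloning for data protection",
       "Incremental data loading patterns"] else []) ++
  (if st.2.1 then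
      ["Secure views for data access control",
       "Row-level security within schemas",
       "Dynamic data masking techniques",
       "Role-based access patterns"] else []) ++
  (if st.2.2.1 then
      ["Internal data transformation pipelines",
       "Semi-structured data processing (JSON/XML)",
       "File format handling and parsing",
       "Data quality validation techniques"] else []) ++
  (if st.2.2.2 then
      ["Query optimization and performance tuning",
       "Advanced SQL techniques and patterns",
       "Data modeling best practices",
       "Monitoring and observability within schemas"] else [])

-- ===== PRECONDITION & SPEC =====
-- Pre_ excludes exactly the inputs where Python A raises KeyError: a violation dict without key 'feature'.
def Pre_get_alternative_suggestions (violations : List (List (String × String))) : Prop :=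
  (violations.all (fun v => PySem.Dict.contains (PySem.Dict.mk v) "feature")) = true
instance (violations : List (List (String × String))) : Decidable (Pre_get_alternative_suggestions violations) := by unfold Pre_get_alternative_suggestions; infer_instance
def pvWitness_get_alternative_suggestions : (List (List (String × String))) := [[("feature", "Data Sharing")]]

def Spec_get_alternative_suggestions (violations : List (List (String × String))) (out : List String) : Prop := out = get_alternative_suggestions_alt violations
instance (violations : List (List (String × String))) (out : List String) : Decidable (Spec_get_alternative_suggestions violations out) := by unfold Spec_get_alternative_suggestions; infer_instance

-- ===== CLAIM (what is proved, stated in full; the proofs are below) =====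
def Claim_equal_get_alternative_suggestions : Prop := ∀ (violations : List (List (String × String))), Dom_get_alternative_suggestions violations → Pre_get_alternative_suggestions violations → Spec_get_alternative_suggestions violations (get_alternative_suggestions violations)

-- ===== LEMMAS AND PROOFS =====

-- B's one-pass flag fold computes exactly the four 'any' scans A performs over the feature list
theorem pvFoldFlags (vs : List (List (String × String))) :
    ∀ r s i m : Bool,
    vs.foldl (fun (acc : Bool × Bool × Bool × Bool) v =>
      let f := PySem.Dict.getD (PySem.Dict.mk v) "feature" ""
      (acc.1 || PySem.Str.isIn "Replication" f || PySem.Str.isIn "Disaster" f || PySem.Str.isIn "Failover" f,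
       acc.2.1 || PySem.Str.isIn "Sharing" f,
       acc.2.2.1 || PySem.Str.isIn "Integration" f || PySem.Str.isIn "External" f,
       acc.2.2.2 || PySem.Str.isIn "Management" f || PySem.Str.isIn "Account" f)) (r, s, i, m)
    = (r || (vs.map (fun v => PySem.Dict.getD (PySem.Dict.mk v) "feature" "")).any (fun f =>
           PySem.Str.isIn "Replication" f || PySem.Str.isIn "Disaster" f || PySem.Str.isIn "Failover" f),
       s || (vs.map (fun v => PySem.Dict.getD (PySem.Dict.mk v) "feature" "")).any (fun f =>
           PySem.Str.isIn "Sharing" f),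
       i || (vs.map (fun v => PySem.Dict.getD (PySem.Dict.mk v) "feature" "")).any (fun f =>
           PySem.Str.isIn "Integration" f || PySem.Str.isIn "External" f),
       m || (vs.map (fun v => PySem.Dict.getD (PySem.Dict.mk v) "feature" "")).any (fun f =>
           PySem.Str.isIn "Management" f || PySem.Str.isIn "Account" f)) := by
  induction vs with
  | nil => intro r s i m; simp
  | cons v t ih =>
    intro r s i m
    rw [List.foldl_cons, ih]
    simp [List.any_cons, Bool.or_assoc]

-- in A's dedup loop, 'seen' (as a PySem.Set) and 'unique_alternatives' are the same list
theorem pvDedupLoopA_eq_foldl (l : List String) :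
    ∀ s : PySem.Set String, pvDedupLoopA l s s = l.foldl PySem.Set.add s := by
  induction l with
  | nil => intro s; rfl
  | cons a rest ih =>
    intro s
    by_cases hm : a ∈ s
    · simp [pvDedupLoopA, PySem.Set.add, hm, ih]
    · simp [pvDedupLoopA, PySem.Set.add, hm, ih]

theorem pvDedupLoopA_eq_dedup (l : List String) :
    pvDedupLoopA l [] [] = PySem.List.dedup l := by
  rw [pvDedupLoopA_eq_foldl l [], PySem.List.dedup_eq_ofList, PySem.Set.ofList_eq_foldl]

-- ===== VERDICT (by name: the statement is the Claim_ definition above) =====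
theorem get_alternative_suggestions_spec : Claim_equal_get_alternative_suggestions := by
  unfold Claim_equal_get_alternative_suggestions Spec_get_alternative_suggestions
  intro violations _ _
  unfold get_alternative_suggestions get_alternative_suggestions_alt
  simp only [pvFoldFlags, Bool.false_or, pvDedupLoopA_eq_dedup]
  set fs : List String := violations.map (fun v => PySem.Dict.getD (PySem.Dict.mk v) "feature" "")
  cases h1 : fs.any (fun f =>
      PySem.Str.isIn "Replication" f || PySem.Str.isIn "Disaster" f || PySem.Str.isIn "Failover" f) <;>
  cases h2 : fs.any (fun f =>
      PySem.Str.isIn "Sharing" f) <;>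
  cases h3 : fs.any (fun f =>
      PySem.Str.isIn "Integration" f || PySem.Str.isIn "External" f) <;>
  cases h4 : fs.any (fun f =>
      PySem.Str.isIn "Management" f || PySem.Str.isIn "Account" f) <;>
  simp <;> decide
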